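-- pv_equiv track=rewrite | github.com/matan1008/pygnuutils | pygnuutils/filevercmp.py | match_suffix
-- ===== SOURCE A (Python) =====
-- def match_suffix(str_: str):
--     match = ''
--     read_alpha = False
--     while str_:
--         if read_alpha:
--             read_alpha = False
--             if not str_[0].isalpha() and str_[0] != '~':
--                 match = ''
--         elif str_[0] == '.':
--             read_alpha = True
--             if not match:
--                 match = str_
--         elif not str_[0].isalnum() and str_[0] != '~':
--             match = ''
--         str_ = str_[1:]
--     return match
-- ===== SOURCE B (Python) =====
-- def match_suffix(str_: str):
--     # One forward pass, index-based: scan for a '.', then parse the version-suffix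
--     # grammar ('.' (alpha|'~') (alnum|'~')* )* from it (a final '.' may end the
--     # string); on success return that tail, on failure resume the scan right after
--     # the offending character, so no character is re-examined and no substring
--     # copies are made.
--     n = len(str_)
--     i = 0
--     while i < n:
--         if str_[i] != '.':
--             i += 1
--             continue
--         j = i
--         ok = True
--         while j < n:
--             c = str_[j]
--             if c == '.':
--                 if j + 1 < n and not (str_[j + 1].isalpha() or str_[j + 1] == '~'):
--                     ok = False
--                     j += 1
--                     break
--                 j += 2
--             elif c.isalnum() or c == '~':
--                 j += 1
--             else:
--                 ok = False
--                 break
--         if ok: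
--             return str_[i:]
--         i = j + 1
--     return ''
-- ===== Notes on version B (the rewrite author's own statement) =====
-- stated objective: faster
-- what changed: Replaces A's set/clear state machine (a match variable plus a read_alpha flag, re-slicing the remaining string every iteration) by an index-based scan-then-parse pass: scan forward for a '.', parse the version-suffix grammar ('.' (alpha|'~') (alnum|'~')*)* from it, return that tail on success and otherwise resume the scan right after the offending character, so each character is examined at most twice and no substring copies are made.
import Mathlib
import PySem

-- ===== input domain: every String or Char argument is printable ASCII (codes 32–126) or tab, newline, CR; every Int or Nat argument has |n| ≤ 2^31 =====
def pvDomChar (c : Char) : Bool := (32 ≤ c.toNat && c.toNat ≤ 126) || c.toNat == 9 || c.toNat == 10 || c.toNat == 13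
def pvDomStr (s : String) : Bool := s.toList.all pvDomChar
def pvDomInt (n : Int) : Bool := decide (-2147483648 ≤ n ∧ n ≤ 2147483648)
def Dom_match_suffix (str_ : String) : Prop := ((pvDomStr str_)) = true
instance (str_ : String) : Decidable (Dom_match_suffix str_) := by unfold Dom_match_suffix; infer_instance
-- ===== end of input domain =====

-- B replaces A's set/reset state machine (match + read_alpha flags, re-slicing the string each
-- step) by an index-based scan-then-parse pass that never re-examines a character; the timing
-- run measures whether that is faster.

-- ===== PORT A =====
-- A's while loop: state (match, read_alpha), consuming str_ one char at a time (str_ = str_[1:]).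
def matchSuffixGo : List Char → List Char → Bool → List Char
  | [], m, _ => m
  | c :: rest, m, ra =>
    if ra then
      matchSuffixGo rest (if !(PySem.Chars.isalpha c) && !(c == '~') then [] else m) false
    else if c == '.' then
      matchSuffixGo rest (if m.isEmpty then c :: rest else m) true
    else if !(PySem.Chars.isalnum c) && !(c == '~') then
      matchSuffixGo rest [] false
    else
      matchSuffixGo rest m false

def match_suffix (str_ : String) : String :=
  String.mk (matchSuffixGo str_.toList [] false)

-- ===== PORT B =====
-- Source B's inner parse loop from a candidate '.': none = the suffix grammar parses to the end
-- of the string; some rest = parse failed, rest is what follows the offending character.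
def parseFrom : List Char → Option (List Char)
  | [] => none
  | c :: t =>
    if c == '.' then
      match t with
      | [] => none
      | d :: t2 => if PySem.Chars.isalpha d || d == '~' then parseFrom t2 else some t2
    else if PySem.Chars.isalnum c || c == '~' then parseFrom t
    else some t

-- the parse consumes at least the offending character, so the outer scan advances
theorem parseFrom_some_lt (n : Nat) : ∀ r rest : List Char, r.length ≤ n →
    parseFrom r = some rest → rest.length < r.length := by
  induction n with
  | zero =>
    intro r rest hr h
    interval_cases hl : r.length
    rw [List.length_eq_zero_iff] at hl; subst hl; simp [parseFrom] at h
  | succ n ih =>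
    intro r rest hr h
    cases r with
    | nil => simp [parseFrom] at h
    | cons c t =>
      simp only [List.length_cons] at hr
      by_cases hdot : (c == '.') = true
      · cases t with
        | nil => simp [parseFrom, hdot] at h
        | cons d t2 =>
          by_cases ha : (PySem.Chars.isalpha d || d == '~') = true
          · rw [show parseFrom (c :: d :: t2) = parseFrom t2 by
              simp [parseFrom, hdot, ha]] at h
            have := ih t2 rest (by simp only [List.length_cons] at hr; omega) h
            simp only [List.length_cons]
            omega
          · simp only [Bool.not_eq_true] at ha
            rw [show parseFrom (c :: d :: t2) = some t2 by simp [parseFrom, hdot, ha]] at h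
            cases h
            simp only [List.length_cons]
            omega
      · by_cases hb : (PySem.Chars.isalnum c || c == '~') = true
        · have hpf : parseFrom (c :: t) = parseFrom t := by
            rw [parseFrom.eq_def]; simp [hdot, hb]
          rw [hpf] at h
          have := ih t rest (by omega) h
          simp only [List.length_cons]
          omega
        · simp only [Bool.not_eq_true] at hb
          have hpf : parseFrom (c :: t) = some t := by
            rw [parseFrom.eq_def]; simp [hdot, hb]
          rw [hpf] at h
          cases h
          simp

-- Source B's outer loop: scan for a '.', attempt the parse, on failure resume after the
-- offending character.
def scanGo : List Char → List Char
  | [] => []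
  | c :: t =>
    if c == '.' then
      match h : parseFrom (c :: t) with
      | none => c :: t
      | some rest => scanGo rest
    else scanGo t
termination_by l => l.length
decreasing_by
  · exact parseFrom_some_lt (c :: t).length _ _ le_rfl h
  · simp

def match_suffix_alt (str_ : String) : String :=
  String.mk (scanGo str_.toList)

-- ===== PRECONDITION & SPEC =====
def Spec_match_suffix (str_ : String) (out : String) : Prop := out = match_suffix_alt str_
instance (str_ : String) (out : String) : Decidable (Spec_match_suffix str_ out) := by unfold Spec_match_suffix; infer_instance

-- ===== CLAIM (what is proved, stated in full; the proofs are below) =====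
def Claim_equal_match_suffix : Prop := ∀ (str_ : String), Dom_match_suffix str_ → Spec_match_suffix str_ (match_suffix str_)

-- ===== LEMMAS AND PROOFS =====

-- Reference simulation of A's state machine, without the match variable:
-- okGo ra r = "no reset ever happens from state ra on r";
-- resGo ra r = the rest of the input right after the first reset.
def okGo : Bool → List Char → Bool
  | _, [] => true
  | true, c :: t => (PySem.Chars.isalpha c || c == '~') && okGo false t
  | false, c :: t =>
    if c == '.' then okGo true t
    else (PySem.Chars.isalnum c || c == '~') && okGo false t

def resGo : Bool → List Char → List Char
  | _, [] => []
  | true, c :: t => if PySem.Chars.isalpha c || c == '~' then resGo false t else t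
  | false, c :: t =>
    if c == '.' then resGo true t
    else if PySem.Chars.isalnum c || c == '~' then resGo false t else t

theorem bnot_and_bnot (a b : Bool) : (!a && !b) = !(a || b) := by
  cases a <;> cases b <;> rfl

theorem resGo_le (ra : Bool) (r : List Char) : (resGo ra r).length ≤ r.length := by
  induction r generalizing ra with
  | nil => simp [resGo]
  | cons c t ih =>
    cases ra
    · simp only [resGo]
      split
      · exact le_trans (ih true) (by simp)
      · split
        · exact le_trans (ih false) (by simp)
        · simp
    · simp only [resGo]
      split
      · exact le_trans (ih false) (by simp)
      · simp

-- L1: A's loop with a non-empty match equals the simulation.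
theorem matchSuffixGo_of_ne (r : List Char) (m : List Char) (hm : m ≠ []) : ∀ ra : Bool,
    matchSuffixGo r m ra =
      if okGo ra r then m else matchSuffixGo (resGo ra r) [] false := by
  induction r with
  | nil => intro ra; simp [matchSuffixGo, okGo]
  | cons c t ih =>
    intro ra
    cases ra with
    | true =>
      by_cases h : (PySem.Chars.isalpha c || c == '~') = true
      · have h' : (!(PySem.Chars.isalpha c) && !(c == '~')) = false := by
          rw [bnot_and_bnot, h]; rfl
        simp [matchSuffixGo, okGo, resGo, h, h', ih false]
      · have h' : (!(PySem.Chars.isalpha c) && !(c == '~')) = true := by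
          rw [bnot_and_bnot]; simp [h]
        simp only [Bool.not_eq_true] at h
        simp [matchSuffixGo, okGo, resGo, h, h']
    | false =>
      by_cases hdot : (c == '.') = true
      · simp [matchSuffixGo, okGo, resGo, hdot, hm, ih true]
      · by_cases h : (PySem.Chars.isalnum c || c == '~') = true
        · have h' : (!(PySem.Chars.isalnum c) && !(c == '~')) = false := by
            rw [bnot_and_bnot, h]; rfl
          simp [matchSuffixGo, okGo, resGo, hdot, h, h', ih false]
        · have h' : (!(PySem.Chars.isalnum c) && !(c == '~')) = true := by
            rw [bnot_and_bnot]; simp [h]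
          simp only [Bool.not_eq_true] at h
          simp [matchSuffixGo, okGo, resGo, hdot, h, h']

-- P: Source B's parse computes exactly A's no-reset predicate and reset point.
theorem parseFrom_eq (n : Nat) : ∀ r : List Char, r.length ≤ n →
    parseFrom r = if okGo false r then none else some (resGo false r) := by
  induction n with
  | zero =>
    intro r hr
    interval_cases h : r.length
    rw [List.length_eq_zero_iff] at h; subst h; simp [parseFrom, okGo]
  | succ n ih =>
    intro r hr
    cases r with
    | nil => simp [parseFrom, okGo]
    | cons c t =>
      simp only [List.length_cons] at hr
      by_cases hdot : (c == '.') = true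
      · have hc : c = '.' := by simpa using hdot
        subst hc
        cases t with
        | nil => simp [parseFrom, okGo]
        | cons d t2 =>
          by_cases ha : (PySem.Chars.isalpha d || d == '~') = true
          · have hok : okGo false ('.' :: d :: t2) = okGo false t2 := by
              simp [okGo, ha]
            have hres : resGo false ('.' :: d :: t2) = resGo false t2 := by
              simp [resGo, ha]
            rw [show parseFrom ('.' :: d :: t2) = parseFrom t2 by
              simp [parseFrom, ha]]
            rw [hok, hres]
            exact ih t2 (by simp only [List.length_cons] at hr; omega)
          · simp only [Bool.not_eq_true] at ha
            rw [show parseFrom ('.' :: d :: t2) = some t2 by simp [parseFrom, ha]]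
            simp [okGo, resGo, ha]
      · have hc : ¬ c = '.' := by simpa using hdot
        by_cases hb : (PySem.Chars.isalnum c || c == '~') = true
        · have hpf : parseFrom (c :: t) = parseFrom t := by
            rw [parseFrom.eq_def]; simp [hdot, hb]
          rw [hpf]
          rw [show okGo false (c :: t) = okGo false t by simp [okGo, hdot, hb]]
          rw [show resGo false (c :: t) = resGo false t by simp [resGo, hdot, hb]]
          exact ih t (by omega)
        · simp only [Bool.not_eq_true] at hb
          have hpf : parseFrom (c :: t) = some t := by
            rw [parseFrom.eq_def]; simp [hdot, hb]
          rw [hpf]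
          simp [okGo, resGo, hdot, hb]

-- Main: A's loop from the initial state computes B's scan.
theorem matchSuffixGo_eq_scanGo (n : Nat) : ∀ s : List Char, s.length ≤ n →
    matchSuffixGo s [] false = scanGo s := by
  induction n with
  | zero =>
    intro s hs
    interval_cases h : s.length
    rw [List.length_eq_zero_iff] at h; subst h; simp [matchSuffixGo, scanGo]
  | succ n ih =>
    intro s hs
    cases s with
    | nil => simp [matchSuffixGo, scanGo]
    | cons c t =>
      simp only [List.length_cons] at hs
      by_cases hdot : (c == '.') = true
      · have hc : c = '.' := by simpa using hdot
        subst hc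
        have hA : matchSuffixGo ('.' :: t) [] false = matchSuffixGo t ('.' :: t) true := by
          simp [matchSuffixGo]
        have hokfa : okGo false ('.' :: t) = okGo true t := by simp [okGo]
        have hresfa : resGo false ('.' :: t) = resGo true t := by simp [resGo]
        have hP := parseFrom_eq ('.' :: t).length ('.' :: t) le_rfl
        rw [hokfa, hresfa] at hP
        rw [hA, matchSuffixGo_of_ne t ('.' :: t) (by simp) true]
        rw [scanGo, if_pos hdot]
        by_cases hok : okGo true t = true
        · rw [if_pos hok]
          split
          · rfl
          · rename_i rest heq
            rw [hP, if_pos hok] at heq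
            cases heq
        · simp only [Bool.not_eq_true] at hok
          rw [hok]
          simp only [Bool.false_eq_true, if_false]
          split
          · rename_i heq
            rw [hP, hok] at heq
            simp only [Bool.false_eq_true, if_false] at heq
            exact absurd heq (by simp)
          · rename_i rest heq
            rw [hP, hok] at heq
            simp only [Bool.false_eq_true, if_false, Option.some.injEq] at heq
            subst heq
            exact ih (resGo true t) (le_trans (resGo_le true t) (by omega))
      · have hc : ¬ c = '.' := by simpa using hdot
        have hstep : matchSuffixGo (c :: t) [] false = matchSuffixGo t [] false := by
          by_cases h : (!(PySem.Chars.isalnum c) && !(c == '~')) = true <;>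
            simp [matchSuffixGo, hdot, h]
        rw [hstep, scanGo, if_neg hdot]
        exact ih t (by omega)

-- ===== VERDICT (by name: the statement is the Claim_ definition above) =====
theorem match_suffix_spec : Claim_equal_match_suffix := by
  intro str_ _
  unfold Spec_match_suffix match_suffix match_suffix_alt
  rw [matchSuffixGo_eq_scanGo str_.toList.length _ le_rfl]
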